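-- pv_equiv track=rewrite | github.com/Elle0-0/TestingSuite | outputs/run_3/gpt/api_client_iteration_3_solution.py | build_example_urls
-- ===== SOURCE A (Python) =====
-- def build_example_urls(count: int = 60) -> list[str]:
--     urls = []
--     for i in range(count):
--         suffix = f"station-{i:03d}"
--         if i % 17 == 0:
--             suffix = f"forbidden-{suffix}"
--         elif i % 13 == 0:
--             suffix = f"invalid-{suffix}"
--         elif i % 11 == 0:
--             suffix = f"down-{suffix}"
--         elif i % 7 == 0:
--             suffix = f"flaky-{suffix}"
--         urls.append(f"https://api.example.com/{suffix}")
--     return urls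
-- ===== SOURCE B (Python) =====
-- def build_example_urls(count: int = 60) -> list[str]:
--     # Stamp a prefix table by divisor strides (increasing priority: later writes win,
--     # so 17 overrides 13 overrides 11 overrides 7, matching the elif chain's priority).
--     prefixes = [""] * max(count, 0)
--     for d, name in ((7, "flaky-"), (11, "down-"), (13, "invalid-"), (17, "forbidden-")):
--         for i in range(0, count, d):
--             prefixes[i] = name
--     return [f"https://api.example.com/{p}station-{i:03d}" for i, p in enumerate(prefixes)]
-- ===== Notes on version B (the rewrite author's own statement) =====
-- stated objective: alternative
-- what changed: Replaced the per-index elif divisor chain by a prefix table stamped by divisor strides (writes at multiples of 7, 11, 13, 17 in increasing priority so later writes win), then one assembly pass over enumerate.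
import Mathlib
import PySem

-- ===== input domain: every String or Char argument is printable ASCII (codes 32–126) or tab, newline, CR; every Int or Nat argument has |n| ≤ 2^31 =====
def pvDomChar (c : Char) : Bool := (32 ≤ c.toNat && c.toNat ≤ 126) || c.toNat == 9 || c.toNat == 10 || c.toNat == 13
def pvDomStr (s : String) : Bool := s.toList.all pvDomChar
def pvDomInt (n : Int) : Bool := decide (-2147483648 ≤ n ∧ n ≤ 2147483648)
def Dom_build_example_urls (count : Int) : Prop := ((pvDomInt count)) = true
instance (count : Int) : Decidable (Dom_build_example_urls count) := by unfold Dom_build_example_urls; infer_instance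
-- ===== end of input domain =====

-- B replaces A's per-index elif divisor chain by a prefix table stamped by divisor strides
-- (later writes win, matching the elif priority); same cost, different decomposition.

-- f"{i:03d}" for i ≥ 0 (the only indices produced by range(count)): left-pad str(i) with '0' to width 3
def pad3 (i : Int) : List Char :=
  let s := PySem.Int.toChars i
  List.replicate (3 - s.length) '0' ++ s

-- ===== PORT A =====
def build_example_urls (count : Int) : List String :=
  (PySem.List.pyRange 0 count 1).foldl (fun urls i =>
    let suffix := "station-".toList ++ pad3 i
    let suffix :=
      if PySem.Int.mod i 17 = 0 then "forbidden-".toList ++ suffix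
      else if PySem.Int.mod i 13 = 0 then "invalid-".toList ++ suffix
      else if PySem.Int.mod i 11 = 0 then "down-".toList ++ suffix
      else if PySem.Int.mod i 7 = 0 then "flaky-".toList ++ suffix
      else suffix
    urls ++ [String.ofList ("https://api.example.com/".toList ++ suffix)]) []

-- ===== PORT B =====
-- prefixes[i] = name : every stamped index i satisfies 0 ≤ i < count ≤ len(prefixes), so
-- List.set at i.toNat is exact (Python never raises here).
def build_example_urls_alt (count : Int) : List String :=
  let prefixes : List (List Char) :=
    [((7:Int), "flaky-".toList), ((11:Int), "down-".toList),
     ((13:Int), "invalid-".toList), ((17:Int), "forbidden-".toList)].foldl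
      (fun pres dn =>
        (PySem.List.pyRange 0 count dn.1).foldl (fun acc i => acc.set i.toNat dn.2) pres)
      (List.replicate (max count 0).toNat [])
  (PySem.List.enumerate prefixes 0).map (fun ip =>
    String.ofList ("https://api.example.com/".toList ++ ip.2 ++ "station-".toList ++ pad3 ip.1))

-- ===== PRECONDITION & SPEC =====
def Spec_build_example_urls (count : Int) (out : List String) : Prop := out = build_example_urls_alt count
instance (count : Int) (out : List String) : Decidable (Spec_build_example_urls count out) := by unfold Spec_build_example_urls; infer_instance

-- ===== CLAIM (what is proved, stated in full; the proofs are below) =====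
def Claim_equal_build_example_urls : Prop := ∀ (count : Int), Dom_build_example_urls count → Spec_build_example_urls count (build_example_urls count)

-- ===== LEMMAS AND PROOFS =====

-- the prefix A's elif chain selects for index j
def prefFor (j : Int) : List Char :=
  if (17:Int) ∣ j then "forbidden-".toList
  else if (13:Int) ∣ j then "invalid-".toList
  else if (11:Int) ∣ j then "down-".toList
  else if (7:Int) ∣ j then "flaky-".toList
  else []

def urlFor (j : Int) : String :=
  String.ofList ("https://api.example.com/".toList ++ prefFor j ++ "station-".toList ++ pad3 j)

lemma A_eq_map (count : Int) :
    build_example_urls count = (PySem.List.pyRange 0 count 1).map urlFor := by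
  unfold build_example_urls
  rw [PySem.List.foldl_append_singleton_eq_map]
  simp only [List.nil_append]
  refine List.map_congr_left (fun i _ => ?_)
  simp only [urlFor, prefFor, PySem.Int.mod_eq_zero_iff_dvd]
  split_ifs <;> simp

-- after folding a list of nonnegative indices with `set`, entry j holds v iff j occurred (and was in range)
lemma foldl_set_getElem? {α : Type} (is : List Int) (h0 : ∀ i ∈ is, 0 ≤ i)
    (l : List α) (j : Nat) (v : α) :
    (is.foldl (fun acc i => acc.set i.toNat v) l)[j]? =
      if (j : Int) ∈ is ∧ j < l.length then some v else l[j]? := by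
  induction is generalizing l with
  | nil => simp
  | cons i is ih =>
    have hi : 0 ≤ i := h0 i (by simp)
    rw [List.foldl_cons, ih (fun x hx => h0 x (by simp [hx]))]
    simp only [List.length_set, List.mem_cons]
    by_cases hmem : (j : Int) ∈ is
    · by_cases hlen : j < l.length <;> simp [hmem, hlen]
    · by_cases hji : (j : Int) = i
      · have hij : i.toNat = j := by omega
        by_cases hlen : j < l.length <;>
          simp [hji, hlen, hij]
      · have hij : i.toNat ≠ j := by omega
        simp [hmem, hji, hij]

-- entry j of the table stamped by one divisor stride
lemma stamp_getElem? {α : Type} (count d : Int) (hd : 0 < d) (l : List α) (j : Nat) (v : α) :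
    ((PySem.List.pyRange 0 count d).foldl (fun acc i => acc.set i.toNat v) l)[j]? =
      if (j : Int) < count ∧ d ∣ (j : Int) ∧ j < l.length then some v else l[j]? := by
  rw [foldl_set_getElem? _ (fun i hi => ((PySem.List.mem_pyRange_iff_of_pos hd i).1 hi).1) l j v]
  simp only [PySem.List.mem_pyRange_iff_of_pos hd, Int.sub_zero]
  have h0j : (0:Int) ≤ (j:Int) := by positivity
  by_cases h1 : (j:Int) < count <;> by_cases h2 : d ∣ (j:Int) <;>
    by_cases h3 : j < l.length <;> simp [h0j, h1, h2, h3]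

lemma stamp_length {α : Type} (is : List Int) (l : List α) (v : α) :
    (is.foldl (fun acc i => acc.set i.toNat v) l).length = l.length := by
  induction is generalizing l with
  | nil => rfl
  | cons i is ih => rw [List.foldl_cons, ih, List.length_set]

lemma B_eq_map (count : Int) :
    build_example_urls_alt count = (PySem.List.pyRange 0 count 1).map urlFor := by
  unfold build_example_urls_alt
  simp only [List.foldl_cons, List.foldl_nil]
  set n := count.toNat with hn
  have hmax : (max count 0).toNat = n := by omega
  set l0 : List (List Char) := List.replicate (max count 0).toNat ([] : List Char) with hl0
  have hlen0 : l0.length = n := by simp [hl0, hmax]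
  set l7 := (PySem.List.pyRange 0 count 7).foldl (fun acc i => acc.set i.toNat "flaky-".toList) l0 with hl7
  set l11 := (PySem.List.pyRange 0 count 11).foldl (fun acc i => acc.set i.toNat "down-".toList) l7 with hl11
  set l13 := (PySem.List.pyRange 0 count 13).foldl (fun acc i => acc.set i.toNat "invalid-".toList) l11 with hl13
  set l17 := (PySem.List.pyRange 0 count 17).foldl (fun acc i => acc.set i.toNat "forbidden-".toList) l13 with hl17
  have hlen7 : l7.length = n := by rw [hl7, stamp_length, hlen0]
  have hlen11 : l11.length = n := by rw [hl11, stamp_length, hlen7]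
  have hlen13 : l13.length = n := by rw [hl13, stamp_length, hlen11]
  have hlen17 : l17.length = n := by rw [hl17, stamp_length, hlen13]
  have hentry : ∀ j : Nat, j < n → l17[j]? = some (prefFor (j : Int)) := by
    intro j hj
    have hjc : (j : Int) < count := by omega
    rw [hl17, stamp_getElem? _ _ (by norm_num), hl13, stamp_getElem? _ _ (by norm_num),
        hl11, stamp_getElem? _ _ (by norm_num), hl7, stamp_getElem? _ _ (by norm_num)]
    rw [hlen13, hlen11, hlen7]
    have hget0 : l0[j]? = some ([] : List Char) := by
      rw [hl0, List.getElem?_replicate]; simp [hmax, hj]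
    simp only [hjc, hj, true_and, and_true, prefFor]
    split_ifs <;> simp_all
  apply List.ext_getElem
  · simp only [List.length_map, PySem.List.length_enumerate, hlen17,
      PySem.List.length_pyRange_one, Int.sub_zero, hn]
  · intro k h1 h2
    have hkE : k < (PySem.List.enumerate l17 0).length := h1.trans_eq (by simp)
    have hk : k < n := by
      have := hkE; rwa [PySem.List.length_enumerate, hlen17] at this
    rw [List.getElem_map, List.getElem_map, PySem.List.getElem_enumerate]
    have hval : l17[k]'(by omega) = prefFor (k : Int) := by
      have h := hentry k hk
      rwa [List.getElem?_eq_getElem (by omega), Option.some_inj] at h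
    simp [hval, PySem.List.getElem_pyRange_one, urlFor]

-- ===== VERDICT (by name: the statement is the Claim_ definition above) =====
theorem build_example_urls_spec : Claim_equal_build_example_urls := by
  intro count _
  unfold Spec_build_example_urls
  rw [A_eq_map, B_eq_map]
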